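-- pv_equiv track=rewrite | github.com/fdelmo/advent-of-code-22 | problem5/problem5.py | get_top_crates
-- ===== SOURCE A (Python) =====
-- def get_top_crates(crates: list[list[str]]) -> str:
--     """
--     Given the crates setup, return the leters of the crates on top of each stack.
--     """
--     top = ''
--     for stack in crates:
--         for i in range(1, len(stack)+1):
--             last = stack[-i]
--
--             if last != '':
--                 top += last
--                 break
--
--     return top
-- ===== SOURCE B (Python) =====
-- def get_top_crates(crates: list[list[str]]) -> str:
--     """
--     Given the crates setup, return the letters of the crates on top of each stack.
--     """
--     tops = []
--     for stack in crates:
--         letter = ''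
--         for c in stack:
--             if c:
--                 letter = c
--         tops.append(letter)
--     return ''.join(tops)
-- ===== Notes on version B (the rewrite author's own statement) =====
-- stated objective: simpler
-- what changed: Replaces the backward indexed scan with early break by a single forward pass per stack that maintains the most recent non-empty string, collecting the per-stack results and joining them.
import Mathlib
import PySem

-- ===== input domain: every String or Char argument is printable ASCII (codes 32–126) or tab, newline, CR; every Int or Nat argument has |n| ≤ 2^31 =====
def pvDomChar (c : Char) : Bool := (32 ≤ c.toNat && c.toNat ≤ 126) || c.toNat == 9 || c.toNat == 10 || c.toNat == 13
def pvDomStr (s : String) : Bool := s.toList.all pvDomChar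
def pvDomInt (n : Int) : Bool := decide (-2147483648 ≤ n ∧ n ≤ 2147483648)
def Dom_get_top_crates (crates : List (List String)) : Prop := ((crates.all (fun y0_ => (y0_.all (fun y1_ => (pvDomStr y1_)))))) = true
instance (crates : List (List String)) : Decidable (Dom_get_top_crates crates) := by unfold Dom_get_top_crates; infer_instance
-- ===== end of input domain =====

-- B replaces A's backward indexed scan with break by a forward pass per stack
-- maintaining the last non-empty string, then joins the per-stack results (simpler).

-- ===== PORT A =====
-- inner loop of A: 'for i in range(1, len(stack)+1): last = stack[-i]; if last != '': top += last; break'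
-- the 'none' branch is Python's IndexError; unreachable here since every i satisfies 1 ≤ i ≤ len(stack)
def innerA (stack : List String) : List Int → String
  | [] => ""
  | i :: rest =>
    match PySem.List.pyGet? stack (-i) with
    | some last => if last ≠ "" then last else innerA stack rest
    | none => ""

def get_top_crates (crates : List (List String)) : String :=
  crates.foldl
    (fun top stack => top ++ innerA stack (PySem.List.pyRange 1 ((stack.length : Int) + 1) 1)) ""

-- ===== PORT B =====
-- 'letter = ''; for c in stack: if c: letter = c'
def lastNonEmpty (stack : List String) : String :=
  stack.foldl (fun letter c => if c ≠ "" then c else letter) ""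

def get_top_crates_alt (crates : List (List String)) : String :=
  String.join (crates.map lastNonEmpty)

-- ===== PRECONDITION & SPEC =====
def Spec_get_top_crates (crates : List (List String)) (out : String) : Prop := out = get_top_crates_alt crates
instance (crates : List (List String)) (out : String) : Decidable (Spec_get_top_crates crates out) := by unfold Spec_get_top_crates; infer_instance

-- ===== CLAIM (what is proved, stated in full; the proofs are below) =====
def Claim_equal_get_top_crates : Prop := ∀ (crates : List (List String)), Dom_get_top_crates crates → Spec_get_top_crates crates (get_top_crates crates)

-- ===== LEMMAS AND PROOFS =====

-- forward fold keeps the first non-empty element of the reversed list (last non-empty)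
lemma foldl_lastNonEmpty (s : List String) :
    ∀ a : String, s.foldl (fun letter c => if c ≠ "" then c else letter) a
      = ((s.reverse.find? (fun c => c ≠ "")).getD a) := by
  induction s with
  | nil => intro a; simp
  | cons x t ih =>
    intro a
    simp only [List.foldl_cons, List.reverse_cons, List.find?_append, ih]
    cases h : t.reverse.find? (fun c => c ≠ "") with
    | some y => simp
    | none => simp [List.find?]; split_ifs <;> simp_all

-- A's inner backward scan starting at offset k equals first non-empty of the reversed tail
lemma innerA_eq_find (s : List String) :
    ∀ (n k : Nat), n = s.length - k →
      innerA s (PySem.List.pyRange ((k : Int) + 1) ((s.length : Int) + 1) 1)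
        = ((s.reverse.drop k).find? (fun c => c ≠ "")).getD "" := by
  intro n
  induction n with
  | zero =>
    intro k hk
    have hlen : s.length ≤ k := by omega
    rw [PySem.List.pyRange_one_eq_nil (by omega)]
    rw [List.drop_eq_nil_of_le (by simpa using hlen)]
    simp [innerA]
  | succ m ih =>
    intro k hk
    have hklt : k < s.length := by omega
    rw [PySem.List.pyRange_one_cons (by omega)]
    have hget : PySem.List.pyGet? s (-(((k + 1 : Nat)) : Int)) = s[s.length - (k + 1)]? :=
      PySem.List.pyGet?_neg_natCast s (k + 1) (by omega) (by omega)
    have hcast : -((k : Int) + 1) = -(((k + 1 : Nat)) : Int) := by push_cast; ring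
    have hidx : s.length - (k + 1) < s.length := by omega
    have hkrev : k < s.reverse.length := by simpa using hklt
    have hdrop : s.reverse.drop k = s.reverse[k]'hkrev :: s.reverse.drop (k + 1) :=
      List.drop_eq_getElem_cons hkrev
    have hrev : s.reverse[k]'hkrev = s[s.length - 1 - k]'(by omega) :=
      List.getElem_reverse _
    have hi : s.length - 1 - k = s.length - (k + 1) := by omega
    simp only [innerA, hcast, hget, List.getElem?_eq_getElem hidx]
    rw [hdrop, List.find?_cons, hrev]
    simp only [hi]
    by_cases hempty : s[s.length - (k + 1)]'hidx = ""
    · rw [show ((k : Int) + 1) + 1 = (((k + 1 : Nat)) : Int) + 1 by push_cast; ring]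
      rw [ih (k + 1) (by omega)]
      simp [hempty]
    · simp [hempty]

lemma innerA_eq_lastNonEmpty (s : List String) :
    innerA s (PySem.List.pyRange 1 ((s.length : Int) + 1) 1) = lastNonEmpty s := by
  have h := innerA_eq_find s (s.length) 0 (by omega)
  simp only [Nat.cast_zero, zero_add, List.drop_zero] at h
  rw [h, lastNonEmpty, foldl_lastNonEmpty]

lemma foldl_append_acc (L : List String) :
    ∀ a : String, L.foldl (fun r s => r ++ s) a = a ++ L.foldl (fun r s => r ++ s) "" := by
  induction L with
  | nil => intro a; simp
  | cons y t ih =>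
    intro a
    simp only [List.foldl_cons]
    rw [ih (a ++ y), ih ("" ++ y)]
    simp [String.append_assoc]

lemma foldl_append_join (l : List (List String)) :
    ∀ acc : String,
      l.foldl (fun top stack =>
          top ++ innerA stack (PySem.List.pyRange 1 ((stack.length : Int) + 1) 1)) acc
        = acc ++ String.join (l.map lastNonEmpty) := by
  induction l with
  | nil => intro acc; simp [String.join]
  | cons x t ih =>
    intro acc
    rw [List.foldl_cons, ih, List.map_cons]
    rw [innerA_eq_lastNonEmpty]
    simp only [String.join]
    rw [List.foldl_cons, foldl_append_acc (List.map lastNonEmpty t) ("" ++ lastNonEmpty x)]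
    simp [String.append_assoc]

-- ===== VERDICT (by name: the statement is the Claim_ definition above) =====
theorem get_top_crates_spec : Claim_equal_get_top_crates := by
  intro crates _
  unfold Spec_get_top_crates get_top_crates get_top_crates_alt
  rw [foldl_append_join]
  simp
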